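-- pv_equiv track=rewrite | github.com/lenarother/advent-of-code | adventofcode_2017/day_21/solution.py | get_pattern_variants
-- ===== SOURCE A (Python) =====
-- def get_pattern_variants(p):
--     """Rotate and flip pattern."""
--     p = p.replace('/', '')
--     variants = {p}
--     if len(p) == 9:
--         variants.add(p[2::3] + p[1::3] + p[::3])
--         variants.add(p[::3] + p[1::3] + p[2::3])
--         variants.add(p[:3][::-1] + p[3:6][::-1] + p[6:][::-1])
--     elif len(p) == 4:
--         variants.add(p[1::2] + p[::2])
--         variants.add(p[::2] + p[1::2])
--         variants.add(p[:2][::-1] + p[2:][::-1])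
--     reversed_variants = {i[::-1] for i in variants}
--     variants |= reversed_variants
--     return variants
-- ===== SOURCE B (Python) =====
-- def get_pattern_variants(p):
--     """Rotate and flip pattern."""
--     s = p.replace('/', '')
--     if len(s) == 9:
--         side = 3
--     elif len(s) == 4:
--         side = 2
--     else:
--         return {s, s[::-1]}
--     grid = [list(s[i * side:(i + 1) * side]) for i in range(side)]
--
--     def rot(m):  # rotate 90 degrees counter-clockwise
--         n = len(m)
--         return [[m[i][n - 1 - j] for i in range(n)] for j in range(n)]
--
--     def transpose(m):
--         n = len(m)
--         return [[m[i][j] for i in range(n)] for j in range(n)]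
--
--     r1 = rot(grid)
--     r2 = rot(r1)
--     r3 = rot(r2)
--     variants = [grid, r1, transpose(grid), transpose(r1),
--                 r2, r3, transpose(r2), transpose(r3)]
--     return {''.join(''.join(row) for row in m) for m in variants}
-- ===== Notes on version B (the rewrite author's own statement) =====
-- stated objective: idiomatic
-- what changed: B builds an explicit side x side grid and generates the eight dihedral variants by composing an index-based rotate-90 and transpose, instead of A's hand-written per-size slicing formulas plus a reversed-string union.
import Mathlib
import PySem

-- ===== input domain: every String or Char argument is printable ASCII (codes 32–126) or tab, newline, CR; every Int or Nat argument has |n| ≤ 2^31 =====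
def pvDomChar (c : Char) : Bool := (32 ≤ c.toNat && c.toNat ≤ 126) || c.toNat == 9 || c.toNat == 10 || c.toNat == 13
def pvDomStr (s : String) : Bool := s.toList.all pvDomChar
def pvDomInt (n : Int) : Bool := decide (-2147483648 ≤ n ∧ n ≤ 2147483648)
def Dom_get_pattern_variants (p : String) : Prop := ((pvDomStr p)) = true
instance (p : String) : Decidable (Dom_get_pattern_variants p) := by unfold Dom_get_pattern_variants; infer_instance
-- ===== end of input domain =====

-- B rebuilds the eight dihedral variants from an explicit side×side grid (rotate/transpose by
-- index arithmetic) instead of A's per-size slicing formulas; objective: idiomatic/alternative,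
-- same cost. Python returns a set (hash order); the ports return its elements in first-insertion
-- order and the theorem states the two ports produce the same list.

-- ===== PORT A =====
-- s[::-1]  (step -1 ≠ 0, so slice? never returns none)
def pvRevA (cs : List Char) : List Char := (PySem.Chars.slice? cs none none (-1)).getD []

def pvACore (p : List Char) : PySem.Set (List Char) :=
  -- body of A after `p = p.replace('/', '')` (the wrapper performs the replace)
  let variants : PySem.Set (List Char) := PySem.Set.ofList [p]
  let variants :=
    if PySem.Chars.len p == 9 then
      (((variants.add
        ((PySem.Chars.slice? p (some 2) none 3).getD [] ++ (PySem.Chars.slice? p (some 1) none 3).getD [] ++ (PySem.Chars.slice? p none none 3).getD [])).add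
        ((PySem.Chars.slice? p none none 3).getD [] ++ (PySem.Chars.slice? p (some 1) none 3).getD [] ++ (PySem.Chars.slice? p (some 2) none 3).getD [])).add
        (pvRevA (PySem.Chars.slice p none (some 3)) ++ pvRevA (PySem.Chars.slice p (some 3) (some 6)) ++ pvRevA (PySem.Chars.slice p (some 6) none)))
    else if PySem.Chars.len p == 4 then
      (((variants.add
        ((PySem.Chars.slice? p (some 1) none 2).getD [] ++ (PySem.Chars.slice? p none none 2).getD [])).add
        ((PySem.Chars.slice? p none none 2).getD [] ++ (PySem.Chars.slice? p (some 1) none 2).getD [])).add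
        (pvRevA (PySem.Chars.slice p none (some 2)) ++ pvRevA (PySem.Chars.slice p (some 2) none)))
    else variants
  let reversed_variants : PySem.Set (List Char) := PySem.Set.ofList (variants.map pvRevA)
  PySem.Set.union variants reversed_variants

def get_pattern_variants (p : String) : List String :=
  (pvACore (PySem.Chars.replace p.toList ['/'] [])).map String.ofList

-- ===== PORT B =====
-- rotate 90° counter-clockwise: result[j][i] = m[i][n-1-j]  (indices always in range, defaults unreachable)
def pvRot (m : List (List Char)) : List (List Char) :=
  let n : Int := m.length
  (PySem.List.pyRange 0 n 1).map (fun j =>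
    (PySem.List.pyRange 0 n 1).map (fun i =>
      PySem.List.pyGetD (PySem.List.pyGetD m i []) (n - 1 - j) ' '))

-- transpose: result[j][i] = m[i][j]
def pvTranspose (m : List (List Char)) : List (List Char) :=
  let n : Int := m.length
  (PySem.List.pyRange 0 n 1).map (fun j =>
    (PySem.List.pyRange 0 n 1).map (fun i =>
      PySem.List.pyGetD (PySem.List.pyGetD m i []) j ' '))

-- the side×side case: grid of rows, the four rotations and their transposes,
-- flattened (''.join of the rows = List.flatten) and collected into a set
def pvBGrid (s : List Char) (side : Int) : PySem.Set (List Char) :=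
  let grid := (PySem.List.pyRange 0 side 1).map (fun i =>
    PySem.Chars.slice s (some (i * side)) (some ((i + 1) * side)))
  let r1 := pvRot grid
  let r2 := pvRot r1
  let r3 := pvRot r2
  PySem.Set.ofList ([grid, r1, pvTranspose grid, pvTranspose r1,
                     r2, r3, pvTranspose r2, pvTranspose r3].map List.flatten)

def pvBCore (s : List Char) : PySem.Set (List Char) :=
  -- body of B after `s = p.replace('/', '')`; s[::-1] is List.reverse (PySem.List.slice?_none_none_neg_one)
  if PySem.Chars.len s == 9 then pvBGrid s 3
  else if PySem.Chars.len s == 4 then pvBGrid s 2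
  else PySem.Set.ofList [s, s.reverse]

def get_pattern_variants_alt (p : String) : List String :=
  (pvBCore (PySem.Chars.replace p.toList ['/'] [])).map String.ofList

-- ===== PRECONDITION & SPEC =====
def Spec_get_pattern_variants (p : String) (out : List String) : Prop := out = get_pattern_variants_alt p
instance (p : String) (out : List String) : Decidable (Spec_get_pattern_variants p out) := by unfold Spec_get_pattern_variants; infer_instance

-- ===== CLAIM (what is proved, stated in full; the proofs are below) =====
def Claim_equal_get_pattern_variants : Prop := ∀ (p : String), Dom_get_pattern_variants p → Spec_get_pattern_variants p (get_pattern_variants p)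

-- ===== LEMMAS AND PROOFS =====

theorem pvRevA_eq (cs : List Char) : pvRevA cs = cs.reverse := by
  simp [pvRevA, PySem.Chars.slice?_eq_listSlice?, PySem.List.slice?_none_none_neg_one]

-- updating with the dedup of (l.map f) is updating with l.map f itself
theorem pv_update_map_ofList {α : Type} [BEq α] [LawfulBEq α] (s : PySem.Set α)
    (l : List α) (f : α → α) :
    s.update ((PySem.Set.ofList l).map f) = s.update (l.map f) := by
  induction l using List.reverseRecOn with
  | nil => rfl
  | append_singleton l x ih =>
    by_cases hx : x ∈ l
    · rw [PySem.Set.ofList_append_singleton, PySem.Set.add_of_mem (by simpa [PySem.Set.mem_ofList] using hx),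
        ih, List.map_append, PySem.Set.update_append]
      have hm : f x ∈ s.update (l.map f) := by
        rw [PySem.Set.mem_update]; exact Or.inr (List.mem_map_of_mem hx)
      exact (PySem.Set.add_of_mem hm).symm
    · rw [PySem.Set.ofList_append_singleton, PySem.Set.add_of_not_mem (by simpa [PySem.Set.mem_ofList] using hx),
        List.map_append, List.map_append, PySem.Set.update_append, PySem.Set.update_append, ih]

-- A's union step: variants | {f(i) for i in variants} = ofList (l ++ l.map f)
theorem pv_union_map (l : List (List Char)) (f : List Char → List Char) :
    PySem.Set.union (PySem.Set.ofList l) (PySem.Set.ofList ((PySem.Set.ofList l).map f))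
      = PySem.Set.ofList (l ++ l.map f) := by
  show (PySem.Set.ofList l).update (PySem.Set.ofList ((PySem.Set.ofList l).map f))
      = PySem.Set.ofList (l ++ l.map f)
  have h1 : (PySem.Set.ofList l).update (PySem.Set.ofList ((PySem.Set.ofList l).map f))
      = (PySem.Set.ofList l).update ((PySem.Set.ofList l).map f) := by
    have := pv_update_map_ofList (PySem.Set.ofList l) ((PySem.Set.ofList l).map f) id
    simpa using this
  rw [h1, pv_update_map_ofList, PySem.Set.ofList_append]

-- the add-chain {p} .add t1 .add t2 .add t3 is set([p, t1, t2, t3])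
theorem pv_ofList4 (a b c d : List Char) :
    (((PySem.Set.ofList [a]).add b).add c).add d = PySem.Set.ofList [a, b, c, d] := rfl

-- the base list of A's variants, before the reversed union
def pvBase (p : List Char) : List (List Char) :=
  if PySem.Chars.len p == 9 then
    [p,
     (PySem.Chars.slice? p (some 2) none 3).getD [] ++ (PySem.Chars.slice? p (some 1) none 3).getD [] ++ (PySem.Chars.slice? p none none 3).getD [],
     (PySem.Chars.slice? p none none 3).getD [] ++ (PySem.Chars.slice? p (some 1) none 3).getD [] ++ (PySem.Chars.slice? p (some 2) none 3).getD [],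
     pvRevA (PySem.Chars.slice p none (some 3)) ++ pvRevA (PySem.Chars.slice p (some 3) (some 6)) ++ pvRevA (PySem.Chars.slice p (some 6) none)]
  else if PySem.Chars.len p == 4 then
    [p,
     (PySem.Chars.slice? p (some 1) none 2).getD [] ++ (PySem.Chars.slice? p none none 2).getD [],
     (PySem.Chars.slice? p none none 2).getD [] ++ (PySem.Chars.slice? p (some 1) none 2).getD [],
     pvRevA (PySem.Chars.slice p none (some 2)) ++ pvRevA (PySem.Chars.slice p (some 2) none)]
  else [p]

theorem pvACore_eq (p : List Char) :
    pvACore p = PySem.Set.ofList (pvBase p ++ (pvBase p).map pvRevA) := by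
  unfold pvACore pvBase
  cases hc9 : (PySem.Chars.len p == (9 : Int)) with
  | true =>
    simp only [if_true, pv_ofList4]
    exact pv_union_map _ _
  | false =>
    cases hc4 : (PySem.Chars.len p == (4 : Int)) with
    | true =>
      simp only [if_true, if_false, Bool.false_eq_true, pv_ofList4]
      exact pv_union_map _ _
    | false =>
      simp only [if_false, Bool.false_eq_true]
      exact pv_union_map [p] _

set_option maxHeartbeats 4000000 in
theorem pvCore_eq (p : List Char) : (pvACore p : List (List Char)) = pvBCore p := by
  rw [pvACore_eq]
  by_cases h9 : p.length = 9
  · obtain ⟨a, b, c, d, e, f, g, h, i, hnil⟩ :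
        ∃ a b c d e f g h i, p = [a, b, c, d, e, f, g, h, i] := by
      match p, h9 with
      | [a, b, c, d, e, f, g, h, i], _ => exact ⟨a, b, c, d, e, f, g, h, i, rfl⟩
    subst hnil
    have e1a : pvBase [a, b, c, d, e, f, g, h, i]
        = [[a, b, c, d, e, f, g, h, i], [c, f, i, b, e, h, a, d, g], [a, d, g, b, e, h, c, f, i],
           [c, b, a, f, e, d, i, h, g]] := by
      with_unfolding_all rfl
    have e1 : pvBase [a, b, c, d, e, f, g, h, i]
          ++ (pvBase [a, b, c, d, e, f, g, h, i]).map pvRevA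
        = [[a, b, c, d, e, f, g, h, i], [c, f, i, b, e, h, a, d, g], [a, d, g, b, e, h, c, f, i],
           [c, b, a, f, e, d, i, h, g], [i, h, g, f, e, d, c, b, a], [g, d, a, h, e, b, i, f, c],
           [i, f, c, h, e, b, g, d, a], [g, h, i, d, e, f, a, b, c]] := by
      rw [e1a]; with_unfolding_all rfl
    have hBG : pvBCore [a, b, c, d, e, f, g, h, i]
        = PySem.Set.ofList
          ([[[a, b, c], [d, e, f], [g, h, i]],
            pvRot [[a, b, c], [d, e, f], [g, h, i]],
            pvTranspose [[a, b, c], [d, e, f], [g, h, i]],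
            pvTranspose (pvRot [[a, b, c], [d, e, f], [g, h, i]]),
            pvRot (pvRot [[a, b, c], [d, e, f], [g, h, i]]),
            pvRot (pvRot (pvRot [[a, b, c], [d, e, f], [g, h, i]])),
            pvTranspose (pvRot (pvRot [[a, b, c], [d, e, f], [g, h, i]])),
            pvTranspose (pvRot (pvRot (pvRot [[a, b, c], [d, e, f], [g, h, i]])))].map List.flatten) := by
      with_unfolding_all rfl
    have h1 : pvRot [[a, b, c], [d, e, f], [g, h, i]] = [[c, f, i], [b, e, h], [a, d, g]] := by
      with_unfolding_all rfl
    have h2 : pvRot [[c, f, i], [b, e, h], [a, d, g]] = [[i, h, g], [f, e, d], [c, b, a]] := by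
      with_unfolding_all rfl
    have h3 : pvRot [[i, h, g], [f, e, d], [c, b, a]] = [[g, d, a], [h, e, b], [i, f, c]] := by
      with_unfolding_all rfl
    have t0 : pvTranspose [[a, b, c], [d, e, f], [g, h, i]] = [[a, d, g], [b, e, h], [c, f, i]] := by
      with_unfolding_all rfl
    have t1 : pvTranspose [[c, f, i], [b, e, h], [a, d, g]] = [[c, b, a], [f, e, d], [i, h, g]] := by
      with_unfolding_all rfl
    have t2 : pvTranspose [[i, h, g], [f, e, d], [c, b, a]] = [[i, f, c], [h, e, b], [g, d, a]] := by
      with_unfolding_all rfl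
    have t3 : pvTranspose [[g, d, a], [h, e, b], [i, f, c]] = [[g, h, i], [d, e, f], [a, b, c]] := by
      with_unfolding_all rfl
    have e2 : pvBCore [a, b, c, d, e, f, g, h, i]
        = PySem.Set.ofList
          [[a, b, c, d, e, f, g, h, i], [c, f, i, b, e, h, a, d, g], [a, d, g, b, e, h, c, f, i],
           [c, b, a, f, e, d, i, h, g], [i, h, g, f, e, d, c, b, a], [g, d, a, h, e, b, i, f, c],
           [i, f, c, h, e, b, g, d, a], [g, h, i, d, e, f, a, b, c]] := by
      rw [hBG, h1, h2, h3, t0, t1, t2, t3]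
      exact congrArg PySem.Set.ofList (by with_unfolding_all rfl)
    rw [e1, e2]
  · by_cases h4 : p.length = 4
    · obtain ⟨a, b, c, d, hnil⟩ : ∃ a b c d, p = [a, b, c, d] := by
        match p, h4 with
        | [a, b, c, d], _ => exact ⟨a, b, c, d, rfl⟩
      subst hnil
      have e1a : pvBase [a, b, c, d]
          = [[a, b, c, d], [b, d, a, c], [a, c, b, d], [b, a, d, c]] := by
        with_unfolding_all rfl
      have e1 : pvBase [a, b, c, d] ++ (pvBase [a, b, c, d]).map pvRevA
          = [[a, b, c, d], [b, d, a, c], [a, c, b, d], [b, a, d, c],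
             [d, c, b, a], [c, a, d, b], [d, b, c, a], [c, d, a, b]] := by
        rw [e1a]; with_unfolding_all rfl
      have hBG : pvBCore [a, b, c, d]
          = PySem.Set.ofList
            ([[[a, b], [c, d]],
              pvRot [[a, b], [c, d]],
              pvTranspose [[a, b], [c, d]],
              pvTranspose (pvRot [[a, b], [c, d]]),
              pvRot (pvRot [[a, b], [c, d]]),
              pvRot (pvRot (pvRot [[a, b], [c, d]])),
              pvTranspose (pvRot (pvRot [[a, b], [c, d]])),
              pvTranspose (pvRot (pvRot (pvRot [[a, b], [c, d]])))].map List.flatten) := by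
        with_unfolding_all rfl
      have h1 : pvRot [[a, b], [c, d]] = [[b, d], [a, c]] := by with_unfolding_all rfl
      have h2 : pvRot [[b, d], [a, c]] = [[d, c], [b, a]] := by with_unfolding_all rfl
      have h3 : pvRot [[d, c], [b, a]] = [[c, a], [d, b]] := by with_unfolding_all rfl
      have t0 : pvTranspose [[a, b], [c, d]] = [[a, c], [b, d]] := by with_unfolding_all rfl
      have t1 : pvTranspose [[b, d], [a, c]] = [[b, a], [d, c]] := by with_unfolding_all rfl
      have t2 : pvTranspose [[d, c], [b, a]] = [[d, b], [c, a]] := by with_unfolding_all rfl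
      have t3 : pvTranspose [[c, a], [d, b]] = [[c, d], [a, b]] := by with_unfolding_all rfl
      have e2 : pvBCore [a, b, c, d]
          = PySem.Set.ofList
            [[a, b, c, d], [b, d, a, c], [a, c, b, d], [b, a, d, c],
             [d, c, b, a], [c, a, d, b], [d, b, c, a], [c, d, a, b]] := by
        rw [hBG, h1, h2, h3, t0, t1, t2, t3]
        exact congrArg PySem.Set.ofList (by with_unfolding_all rfl)
      rw [e1, e2]
    · have c9 : (PySem.Chars.len p == (9 : Int)) = false := by
        simp [PySem.Chars.len]; omega
      have c4 : (PySem.Chars.len p == (4 : Int)) = false := by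
        simp [PySem.Chars.len]; omega
      simp only [pvBase, pvBCore, c9, c4, if_false, Bool.false_eq_true]
      simp [pvRevA_eq]

-- ===== VERDICT (by name: the statement is the Claim_ definition above) =====
theorem get_pattern_variants_spec : Claim_equal_get_pattern_variants := by
  intro p _
  show _ = _
  unfold get_pattern_variants get_pattern_variants_alt
  rw [pvCore_eq]
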